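-- pv_equiv track=rewrite | github.com/eliburnsbaseball/statpad-forever | scripts/build_nfl_retired_headshots.py | choose_player
-- ===== SOURCE A (Python) =====
-- def choose_player(candidates, start, end):
--     exact = [p for p in candidates if int(p.get("start") or 0) == start and int(p.get("end") or 0) == end]
--     if exact:
--         return exact[0]
--
--     overlapping = []
--     for player in candidates:
--         p_start = int(player.get("start") or 0)
--         p_end = int(player.get("end") or 0)
--         overlap = min(p_end, end) - max(p_start, start)
--         if overlap >= 0:
--             distance = abs(p_start - start) + abs(p_end - end)
--             overlapping.append((distance, -overlap, player))
--     if overlapping: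
--         overlapping.sort(key=lambda item: (item[0], item[1]))
--         return overlapping[0][2]
--
--     nearest = []
--     for player in candidates:
--         p_start = int(player.get("start") or 0)
--         p_end = int(player.get("end") or 0)
--         distance = abs(p_start - start) + abs(p_end - end)
--         nearest.append((distance, player))
--     nearest.sort(key=lambda item: item[0])
--     return nearest[0][1] if nearest else None
-- ===== SOURCE B (Python) =====
-- def choose_player(candidates, start, end):
--     best = None
--     best_key = None
--     for player in candidates:
--         p_start = int(player.get("start") or 0)
--         p_end = int(player.get("end") or 0)
--         distance = abs(p_start - start) + abs(p_end - end)
--         overlap = min(p_end, end) - max(p_start, start)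
--         if p_start == start and p_end == end:
--             key = (0, 0, 0)
--         elif overlap >= 0:
--             key = (1, distance, -overlap)
--         else:
--             key = (2, distance, 0)
--         if best is None or key < best_key:
--             best, best_key = player, key
--     return best
-- ===== Notes on version B (the rewrite author's own statement) =====
-- stated objective: alternative
-- what changed: Replaces A's three staged phases (exact-match filter, overlap filter + sort, nearest-list sort) with a single pass that keeps the best candidate under a lexicographic (tier, distance, -overlap) priority key, index order breaking ties.
import Mathlib
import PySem

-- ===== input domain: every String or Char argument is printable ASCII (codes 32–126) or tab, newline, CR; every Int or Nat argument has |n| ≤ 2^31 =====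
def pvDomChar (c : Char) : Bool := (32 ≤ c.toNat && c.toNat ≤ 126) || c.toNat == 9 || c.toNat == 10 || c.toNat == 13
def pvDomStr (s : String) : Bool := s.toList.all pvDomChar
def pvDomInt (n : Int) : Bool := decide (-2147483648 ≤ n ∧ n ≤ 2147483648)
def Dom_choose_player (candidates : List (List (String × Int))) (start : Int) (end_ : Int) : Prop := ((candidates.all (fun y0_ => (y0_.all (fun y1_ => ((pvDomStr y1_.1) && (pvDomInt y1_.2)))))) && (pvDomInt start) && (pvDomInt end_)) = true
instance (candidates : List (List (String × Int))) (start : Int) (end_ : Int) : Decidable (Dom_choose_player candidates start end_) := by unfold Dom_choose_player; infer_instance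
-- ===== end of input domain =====

-- B replaces A's three staged filter/sort/return phases by ONE pass keeping the best
-- candidate under a lexicographic (tier, distance, -overlap) key; same return value, no sorts.

-- ===== PORT A =====

-- `int(p.get(k) or 0)`: `p.get(k) or 0` maps a missing key and a stored 0 both to 0; int() on an int is the identity
def pyIntOr0 (p : List (String × Int)) (k : String) : Int :=
  -- first-match association-list lookup = dict.get on the List (String × Int) encoding
  match p.lookup k with
  | none => 0
  | some v => if v = 0 then 0 else v

def choose_player (candidates : List (List (String × Int))) (start : Int) (end_ : Int) : Option (List (String × Int)) :=
  let exact := candidates.filter (fun p => (pyIntOr0 p "start" == start) && (pyIntOr0 p "end" == end_))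
  match exact with
  | e :: _ => some e
  | [] =>
    let overlapping := candidates.foldl (fun acc player =>
      let p_start := pyIntOr0 player "start"
      let p_end := pyIntOr0 player "end"
      let overlap := min p_end end_ - max p_start start
      if 0 ≤ overlap then
        acc ++ [(|p_start - start| + |p_end - end_|, -overlap, player)]
      else acc) []
    match PySem.List.sorted2 overlapping (fun it => it.1) (fun it => it.2.1) with
    | o :: _ => some o.2.2
    | [] =>
      let nearest := candidates.foldl (fun acc player =>
        let p_start := pyIntOr0 player "start"
        let p_end := pyIntOr0 player "end"
        let distance := |p_start - start| + |p_end - end_|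
        acc ++ [(distance, player)]) []
      match PySem.List.sorted nearest (fun it => it.1) with
      | n :: _ => some n.2
      | [] => none

-- ===== PORT B =====

-- Python tuple `<` on two (int, int, int) triples: lexicographic
def pvKeyLt (a b : Int × Int × Int) : Bool :=
  a.1 < b.1 || (a.1 == b.1 && (a.2.1 < b.2.1 || (a.2.1 == b.2.1 && a.2.2 < b.2.2)))

def choose_player_alt (candidates : List (List (String × Int))) (start : Int) (end_ : Int) : Option (List (String × Int)) :=
  (candidates.foldl (fun st player =>
    let p_start := pyIntOr0 player "start"
    let p_end := pyIntOr0 player "end"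
    let distance := |p_start - start| + |p_end - end_|
    let overlap := min p_end end_ - max p_start start
    let key : Int × Int × Int :=
      if (p_start == start) && (p_end == end_) then (0, 0, 0)
      else if 0 ≤ overlap then (1, distance, -overlap)
      else (2, distance, 0)
    match st with
    | none => some (player, key)
    | some best => if pvKeyLt key best.2 then some (player, key) else some best) none).map Prod.fst

-- ===== PRECONDITION & SPEC =====
def Spec_choose_player (candidates : List (List (String × Int))) (start : Int) (end_ : Int) (out : Option (List (String × Int))) : Prop := out = choose_player_alt candidates start end_
instance (candidates : List (List (String × Int))) (start : Int) (end_ : Int) (out : Option (List (String × Int))) : Decidable (Spec_choose_player candidates start end_ out) := by unfold Spec_choose_player; infer_instance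

-- ===== CLAIM (what is proved, stated in full; the proofs are below) =====
def Claim_equal_choose_player : Prop := ∀ (candidates : List (List (String × Int))) (start : Int) (end_ : Int), Dom_choose_player candidates start end_ → Spec_choose_player candidates start end_ (choose_player candidates start end_)

-- ===== LEMMAS AND PROOFS =====

-- generic "first minimum" machinery ---------------------------------------

def pvStep {α : Type} (lt : α → α → Bool) (o : Option α) (x : α) : Option α :=
  match o with
  | none => some x
  | some m => if lt x m then some x else some m

def pvFMin {α : Type} (lt : α → α → Bool) : List α → Option α
  | [] => none
  | x :: t =>
    match pvFMin lt t with
    | none => some x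
    | some m => if lt m x then some m else some x

def pvComb {α : Type} (lt : α → α → Bool) (o r : Option α) : Option α :=
  match o, r with
  | none, r => r
  | some m, none => some m
  | some m, some q => if lt q m then some q else some m

theorem pvComb_none_left {α : Type} (lt : α → α → Bool) (r : Option α) :
    pvComb lt none r = r := by cases r <;> rfl

theorem pvStep_eq_comb {α : Type} (lt : α → α → Bool) (o : Option α) (x : α) :
    pvStep lt o x = pvComb lt o (some x) := by cases o <;> rfl

theorem pvFMin_cons {α : Type} (lt : α → α → Bool) (x : α) (t : List α) :
    pvFMin lt (x :: t) = pvComb lt (some x) (pvFMin lt t) := by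
  cases h : pvFMin lt t <;> simp [pvFMin, pvComb, h]

theorem pvComb_assoc {α : Type} (lt : α → α → Bool)
    (ht : ∀ a b c, lt a b = true → lt b c = true → lt a c = true)
    (hn : ∀ a b c, lt a b = false → lt b c = false → lt a c = false)
    (o s r : Option α) :
    pvComb lt (pvComb lt o s) r = pvComb lt o (pvComb lt s r) := by
  cases o with
  | none => simp [pvComb_none_left]
  | some mo =>
    cases s with
    | none => cases r <;> rfl
    | some ms =>
      cases r with
      | none => by_cases h1 : lt ms mo <;> simp [pvComb, h1]
      | some mr =>
        by_cases h1 : lt ms mo <;> by_cases h2 : lt mr ms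
        · have h3 := ht _ _ _ h2 h1
          simp [pvComb, h1, h2, h3]
        · simp [pvComb, h1, h2]
        · simp [pvComb, h1, h2]
        · have h3 := hn _ _ _ (by simpa using h2) (by simpa using h1)
          simp [pvComb, h1, h2, h3]

theorem pvFoldl_step {α : Type} (lt : α → α → Bool)
    (ht : ∀ a b c, lt a b = true → lt b c = true → lt a c = true)
    (hn : ∀ a b c, lt a b = false → lt b c = false → lt a c = false)
    (xs : List α) : ∀ o : Option α, xs.foldl (pvStep lt) o = pvComb lt o (pvFMin lt xs) := by
  induction xs with
  | nil => intro o; cases o <;> rfl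
  | cons x t ih =>
    intro o
    calc (x :: t).foldl (pvStep lt) o = t.foldl (pvStep lt) (pvStep lt o x) := rfl
      _ = pvComb lt (pvComb lt o (some x)) (pvFMin lt t) := by rw [ih, pvStep_eq_comb]
      _ = pvComb lt o (pvComb lt (some x) (pvFMin lt t)) := pvComb_assoc lt ht hn _ _ _
      _ = pvComb lt o (pvFMin lt (x :: t)) := by rw [pvFMin_cons]

theorem pvHead_insertBy {α : Type} (b : α → α → Bool) (x : α) (ys : List α) :
    (PySem.List.insertBy b x ys).head? = pvStep b ys.head? x := by
  cases ys with
  | nil => rfl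
  | cons y t =>
    simp only [PySem.List.insertBy, pvStep, List.head?]
    by_cases h : b x y <;> simp [h]

theorem pvHead_foldl_insertBy {α : Type} (b : α → α → Bool) (xs : List α) :
    ∀ acc : List α, (xs.foldl (fun a x => PySem.List.insertBy b x a) acc).head? =
      xs.foldl (pvStep b) acc.head? := by
  induction xs with
  | nil => intro acc; rfl
  | cons x t ih =>
    intro acc
    calc ((x :: t).foldl (fun a x => PySem.List.insertBy b x a) acc).head?
        = (t.foldl (fun a x => PySem.List.insertBy b x a) (PySem.List.insertBy b x acc)).head? := rfl
      _ = t.foldl (pvStep b) (PySem.List.insertBy b x acc).head? := ih _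
      _ = t.foldl (pvStep b) (pvStep b acc.head? x) := by rw [pvHead_insertBy]
      _ = (x :: t).foldl (pvStep b) acc.head? := rfl

theorem pvFMin_map {α β : Type} (lt : β → β → Bool) (g : α → β) (l : List α) :
    pvFMin lt (l.map g) = (pvFMin (fun a b => lt (g a) (g b)) l).map g := by
  induction l with
  | nil => rfl
  | cons x t ih =>
    simp only [List.map_cons, pvFMin, ih]
    cases h : pvFMin (fun a b => lt (g a) (g b)) t with
    | none => rfl
    | some m => simp only [Option.map_some]; split <;> simp

theorem pvFMin_mem {α : Type} (lt : α → α → Bool) (l : List α) (m : α)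
    (h : pvFMin lt l = some m) : m ∈ l := by
  induction l with
  | nil => simp [pvFMin] at h
  | cons x t ih =>
    simp only [pvFMin] at h
    cases hf : pvFMin lt t with
    | none =>
      rw [hf] at h; simp only [Option.some.injEq] at h; simp [← h]
    | some q =>
      rw [hf] at h
      change (if lt q x = true then some q else some x) = some m at h
      by_cases hlt : lt q x
      · rw [if_pos hlt] at h
        injection h with h; subst h
        exact List.mem_cons_of_mem _ (ih hf)
      · rw [if_neg hlt] at h
        injection h with h; subst h
        exact List.mem_cons_self

theorem pvFMin_eq_none_iff {α : Type} (lt : α → α → Bool) (l : List α) :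
    pvFMin lt l = none ↔ l = [] := by
  cases l with
  | nil => simp [pvFMin]
  | cons x t =>
    simp only [pvFMin]
    cases pvFMin lt t with
    | none => simp
    | some m =>
      simp only [List.cons_ne_nil, iff_false]
      split <;> simp

-- the task-specific keys ----------------------------------------------------

def pvPs (p : List (String × Int)) : Int := pyIntOr0 p "start"
def pvPe (p : List (String × Int)) : Int := pyIntOr0 p "end"
def pvDist (start end_ : Int) (p : List (String × Int)) : Int :=
  |pvPs p - start| + |pvPe p - end_|
def pvOv (start end_ : Int) (p : List (String × Int)) : Int :=
  min (pvPe p) end_ - max (pvPs p) start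
def pvB0 (start end_ : Int) (p : List (String × Int)) : Bool :=
  (pyIntOr0 p "start" == start) && (pyIntOr0 p "end" == end_)
def pvK (start end_ : Int) (p : List (String × Int)) : Int × Int × Int :=
  if (pvPs p == start) && (pvPe p == end_) then (0, 0, 0)
  else if 0 ≤ pvOv start end_ p then (1, pvDist start end_ p, -pvOv start end_ p)
  else (2, pvDist start end_ p, 0)
def pvLtK (start end_ : Int) (p q : List (String × Int)) : Bool :=
  pvKeyLt (pvK start end_ p) (pvK start end_ q)
def pvLt2 (start end_ : Int) (p q : List (String × Int)) : Bool :=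
  decide (pvDist start end_ p < pvDist start end_ q) ||
    (!decide (pvDist start end_ q < pvDist start end_ p) &&
      decide (-pvOv start end_ p < -pvOv start end_ q))
def pvLtd (start end_ : Int) (p q : List (String × Int)) : Bool :=
  decide (pvDist start end_ p < pvDist start end_ q)

theorem pvKeyLt_trans (a b c : Int × Int × Int) :
    pvKeyLt a b = true → pvKeyLt b c = true → pvKeyLt a c = true := by
  intro h1 h2; simp [pvKeyLt] at *; omega

theorem pvKeyLt_negtrans (a b c : Int × Int × Int) :
    pvKeyLt a b = false → pvKeyLt b c = false → pvKeyLt a c = false := by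
  intro h1 h2
  rw [Bool.eq_false_iff] at *
  intro h; apply h1
  simp [pvKeyLt] at *; omega

theorem pvK_key_forms (s e : Int) (p : List (String × Int)) :
    pvK s e p = (0, 0, 0) ∨ (pvK s e p).1 = 1 ∨ (pvK s e p).1 = 2 := by
  unfold pvK; split
  · left; rfl
  · split
    · right; left; rfl
    · right; right; rfl

theorem pvKeyLt_K_zero (s e : Int) (p : List (String × Int)) :
    pvKeyLt (pvK s e p) (0, 0, 0) = false := by
  rcases pvK_key_forms s e p with h | h | h
  · simp [h, pvKeyLt]
  · simp [pvKeyLt, h]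
  · simp [pvKeyLt, h]

theorem pvK_of_b0 (s e : Int) (p : List (String × Int)) (h : pvB0 s e p = true) :
    pvK s e p = (0, 0, 0) := by
  unfold pvB0 at h; unfold pvK pvPs pvPe
  rw [if_pos h]

theorem pvKeyLt_zero_K (s e : Int) (p : List (String × Int)) (h : pvB0 s e p = false) :
    pvKeyLt (0, 0, 0) (pvK s e p) = true := by
  unfold pvB0 at h; unfold pvK pvPs pvPe
  rw [if_neg (by simp [h])]
  split <;> simp [pvKeyLt]

theorem pvK1 (s e : Int) (p : List (String × Int)) (h : pvB0 s e p = false)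
    (hov : 0 ≤ pvOv s e p) : pvK s e p = (1, pvDist s e p, -pvOv s e p) := by
  unfold pvB0 at h; unfold pvK
  rw [if_neg (by unfold pvPs pvPe; simp [h]), if_pos hov]

theorem pvK2 (s e : Int) (p : List (String × Int)) (h : pvB0 s e p = false)
    (hov : ¬ 0 ≤ pvOv s e p) : pvK s e p = (2, pvDist s e p, 0) := by
  unfold pvB0 at h; unfold pvK
  rw [if_neg (by unfold pvPs pvPe; simp [h]), if_neg hov]

theorem pvKL11 (a b c d : Int) :
    pvKeyLt (1, a, b) (1, c, d) = (decide (a < c) || (!decide (c < a) && decide (b < d))) := by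
  rw [Bool.eq_iff_iff]; simp [pvKeyLt]; omega

theorem pvKL22 (a c : Int) : pvKeyLt (2, a, 0) (2, c, 0) = decide (a < c) := by
  rw [Bool.eq_iff_iff]; simp [pvKeyLt]

theorem pvKL12 (a b c d : Int) : pvKeyLt (1, a, b) (2, c, d) = true := by
  simp [pvKeyLt]

theorem pvKL21 (a b c d : Int) : pvKeyLt (2, a, b) (1, c, d) = false := by
  simp [pvKeyLt]

-- T0 : a tier-0 (exact) candidate exists → the single-pass minimum is the first one
theorem pvT0 (s e : Int) (c : List (List (String × Int))) :
    ∀ (ex : List (String × Int)) (r : List (List (String × Int))),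
      c.filter (pvB0 s e) = ex :: r → pvFMin (pvLtK s e) c = some ex := by
  induction c with
  | nil => intro ex r h; simp at h
  | cons x t ih =>
    intro ex r h
    by_cases hx : pvB0 s e x = true
    · rw [List.filter_cons_of_pos hx] at h
      injection h with h1 h2; subst h1
      rw [pvFMin_cons]
      cases hf : pvFMin (pvLtK s e) t with
      | none => rfl
      | some m =>
        have hlt : pvLtK s e m x = false := by
          unfold pvLtK; rw [pvK_of_b0 s e x hx]; exact pvKeyLt_K_zero s e m
        simp [pvComb, hlt]
    · rw [List.filter_cons_of_neg hx] at h
      have hex := ih ex r h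
      have hexb : pvB0 s e ex = true := by
        have hmem : ex ∈ t.filter (pvB0 s e) := by rw [h]; exact List.mem_cons_self
        exact (List.mem_filter.mp hmem).2
      rw [pvFMin_cons, hex]
      have hlt : pvLtK s e ex x = true := by
        unfold pvLtK; rw [pvK_of_b0 s e ex hexb]
        exact pvKeyLt_zero_K s e x (by simpa using hx)
      simp [pvComb, hlt]

-- T1 : no exact candidate → the single-pass minimum is the best overlapping one,
--      and if none overlaps, the nearest one
theorem pvT1 (s e : Int) (c : List (List (String × Int)))
    (h : ∀ p ∈ c, pvB0 s e p = false) :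
    pvFMin (pvLtK s e) c =
      match pvFMin (pvLt2 s e) (c.filter (fun p => decide (0 ≤ pvOv s e p))) with
      | some p => some p
      | none => pvFMin (pvLtd s e) c := by
  induction c with
  | nil => rfl
  | cons x t ih =>
    have hx : pvB0 s e x = false := h x List.mem_cons_self
    have ht' := ih (fun p hp => h p (List.mem_cons_of_mem _ hp))
    rw [pvFMin_cons]
    by_cases hov : (0 ≤ pvOv s e x)
    · have hkx : pvK s e x = (1, pvDist s e x, -pvOv s e x) := pvK1 s e x hx hov
      rw [List.filter_cons_of_pos (by simpa using hov)]
      cases h2 : pvFMin (pvLt2 s e) (t.filter (fun p => decide (0 ≤ pvOv s e p))) with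
      | some m =>
        rw [h2] at ht'
        have hm := pvFMin_mem _ _ _ h2
        have hmt : m ∈ t := (List.mem_filter.mp hm).1
        have hmov : 0 ≤ pvOv s e m := by simpa using (List.mem_filter.mp hm).2
        have hm0 : pvB0 s e m = false := h m (List.mem_cons_of_mem _ hmt)
        have hkm : pvK s e m = (1, pvDist s e m, -pvOv s e m) := pvK1 s e m hm0 hmov
        have hlt : pvLtK s e m x = pvLt2 s e m x := by
          unfold pvLtK; rw [hkm, hkx, pvKL11]; rfl
        rw [ht', pvFMin_cons, h2]
        by_cases hb : pvLt2 s e m x = true <;>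
          simp [pvComb, hlt, hb]
      | none =>
        rw [h2] at ht'
        rw [ht', pvFMin_cons, h2]
        cases h3 : pvFMin (pvLtd s e) t with
        | none => simp [pvComb]
        | some q =>
          have hqt : q ∈ t := pvFMin_mem _ _ _ h3
          have hq0 : pvB0 s e q = false := h q (List.mem_cons_of_mem _ hqt)
          have hqov : ¬ 0 ≤ pvOv s e q := by
            intro hc
            have hmem : q ∈ t.filter (fun p => decide (0 ≤ pvOv s e p)) :=
              List.mem_filter.mpr ⟨hqt, by simpa using hc⟩
            rw [(pvFMin_eq_none_iff _ _).mp h2] at hmem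
            simp at hmem
          have hkq : pvK s e q = (2, pvDist s e q, 0) := pvK2 s e q hq0 hqov
          have hlt : pvLtK s e q x = false := by
            unfold pvLtK; rw [hkq, hkx]; exact pvKL21 _ _ _ _
          simp [pvComb, hlt]
    · have hkx : pvK s e x = (2, pvDist s e x, 0) := pvK2 s e x hx hov
      rw [List.filter_cons_of_neg (by simpa using hov)]
      cases h2 : pvFMin (pvLt2 s e) (t.filter (fun p => decide (0 ≤ pvOv s e p))) with
      | some m =>
        rw [h2] at ht'
        have hm := pvFMin_mem _ _ _ h2
        have hmt : m ∈ t := (List.mem_filter.mp hm).1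
        have hmov : 0 ≤ pvOv s e m := by simpa using (List.mem_filter.mp hm).2
        have hm0 : pvB0 s e m = false := h m (List.mem_cons_of_mem _ hmt)
        have hkm : pvK s e m = (1, pvDist s e m, -pvOv s e m) := pvK1 s e m hm0 hmov
        have hlt : pvLtK s e m x = true := by
          unfold pvLtK; rw [hkm, hkx]; exact pvKL12 _ _ _ _
        rw [ht']
        simp [pvComb, hlt]
      | none =>
        rw [h2] at ht'
        rw [ht', pvFMin_cons]
        cases h3 : pvFMin (pvLtd s e) t with
        | none => simp [pvComb]
        | some q =>
          have hqt : q ∈ t := pvFMin_mem _ _ _ h3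
          have hq0 : pvB0 s e q = false := h q (List.mem_cons_of_mem _ hqt)
          have hqov : ¬ 0 ≤ pvOv s e q := by
            intro hc
            have hmem : q ∈ t.filter (fun p => decide (0 ≤ pvOv s e p)) :=
              List.mem_filter.mpr ⟨hqt, by simpa using hc⟩
            rw [(pvFMin_eq_none_iff _ _).mp h2] at hmem
            simp at hmem
          have hkq : pvK s e q = (2, pvDist s e q, 0) := pvK2 s e q hq0 hqov
          have hlt : pvLtK s e q x = pvLtd s e q x := by
            unfold pvLtK; rw [hkq, hkx, pvKL22]; rfl
          by_cases hb : pvLtd s e q x = true <;>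
            simp [pvComb, hlt, hb]

-- unpacking B's fold
theorem pvPairLt_trans (a b c : (List (String × Int)) × (Int × Int × Int))
    (h1 : pvKeyLt a.2 b.2 = true) (h2 : pvKeyLt b.2 c.2 = true) :
    pvKeyLt a.2 c.2 = true := pvKeyLt_trans _ _ _ h1 h2

theorem pvPairLt_negtrans (a b c : (List (String × Int)) × (Int × Int × Int))
    (h1 : pvKeyLt a.2 b.2 = false) (h2 : pvKeyLt b.2 c.2 = false) :
    pvKeyLt a.2 c.2 = false := pvKeyLt_negtrans _ _ _ h1 h2

-- B's single pass computes pvFMin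
theorem pvB_eq (c : List (List (String × Int))) (s e : Int) :
    choose_player_alt c s e = pvFMin (pvLtK s e) c := by
  have key : c.foldl (fun st player =>
      let p_start := pyIntOr0 player "start"
      let p_end := pyIntOr0 player "end"
      let distance := |p_start - s| + |p_end - e|
      let overlap := min p_end e - max p_start s
      let key : Int × Int × Int :=
        if (p_start == s) && (p_end == e) then (0, 0, 0)
        else if 0 ≤ overlap then (1, distance, -overlap)
        else (2, distance, 0)
      match st with
      | none => some (player, key)
      | some best => if pvKeyLt key best.2 then some (player, key) else some best) none
      = (c.map (fun p => (p, pvK s e p))).foldl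
          (pvStep (fun a b => pvKeyLt a.2 b.2)) none := by
    rw [List.foldl_map]
    congr 1
    funext st player
    cases st <;> rfl
  show (c.foldl _ none).map Prod.fst = _
  rw [key, pvFoldl_step _ pvPairLt_trans pvPairLt_negtrans, pvComb_none_left,
      pvFMin_map]
  show ((pvFMin (pvLtK s e) c).map (fun p => (p, pvK s e p))).map Prod.fst = _
  cases pvFMin (pvLtK s e) c <;> rfl

-- head of a PySem stable sort is the first minimum
theorem pvB2_trans (a b c : Int × Int × List (String × Int))
    (h1 : (decide (a.1 < b.1) || (!decide (b.1 < a.1) && decide (a.2.1 < b.2.1))) = true)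
    (h2 : (decide (b.1 < c.1) || (!decide (c.1 < b.1) && decide (b.2.1 < c.2.1))) = true) :
    (decide (a.1 < c.1) || (!decide (c.1 < a.1) && decide (a.2.1 < c.2.1))) = true := by
  simp at *; omega

theorem pvB2_negtrans (a b c : Int × Int × List (String × Int))
    (h1 : (decide (a.1 < b.1) || (!decide (b.1 < a.1) && decide (a.2.1 < b.2.1))) = false)
    (h2 : (decide (b.1 < c.1) || (!decide (c.1 < b.1) && decide (b.2.1 < c.2.1))) = false) :
    (decide (a.1 < c.1) || (!decide (c.1 < a.1) && decide (a.2.1 < c.2.1))) = false := by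
  simp at *; omega

theorem pvB1_trans (a b c : Int × List (String × Int))
    (h1 : decide (a.1 < b.1) = true) (h2 : decide (b.1 < c.1) = true) :
    decide (a.1 < c.1) = true := by simp at *; omega

theorem pvB1_negtrans (a b c : Int × List (String × Int))
    (h1 : decide (a.1 < b.1) = false) (h2 : decide (b.1 < c.1) = false) :
    decide (a.1 < c.1) = false := by simp at *; omega

theorem pvHead_sorted2 (l : List (Int × Int × List (String × Int))) :
    (PySem.List.sorted2 l (fun it => it.1) (fun it => it.2.1)).head? =
      pvFMin (fun a b => decide (a.1 < b.1) || (!decide (b.1 < a.1) && decide (a.2.1 < b.2.1))) l := by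
  show (l.foldl (fun acc x => PySem.List.insertBy
      (fun a b => decide (a.1 < b.1) || (!decide (b.1 < a.1) && decide (a.2.1 < b.2.1))) x acc) []).head? = _
  rw [pvHead_foldl_insertBy]
  show l.foldl _ none = _
  rw [pvFoldl_step _ pvB2_trans pvB2_negtrans, pvComb_none_left]

theorem pvHead_sorted1 (l : List (Int × List (String × Int))) :
    (PySem.List.sorted l (fun it => it.1)).head? =
      pvFMin (fun a b => decide (a.1 < b.1)) l := by
  show (l.foldl (fun acc x => PySem.List.insertBy
      (fun a b => decide (a.1 < b.1)) x acc) []).head? = _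
  rw [pvHead_foldl_insertBy]
  show l.foldl _ none = _
  rw [pvFoldl_step _ pvB1_trans pvB1_negtrans, pvComb_none_left]

-- ===== VERDICT (by name: the statement is the Claim_ definition above) =====
theorem choose_player_spec : Claim_equal_choose_player := by
  intro c s e _hdom
  unfold Spec_choose_player
  rw [pvB_eq]
  have hA : choose_player c s e =
      (match c.filter (fun p => (pyIntOr0 p "start" == s) && (pyIntOr0 p "end" == e)) with
      | e :: _ => some e
      | [] =>
        match PySem.List.sorted2 (c.foldl (fun acc player =>
            let p_start := pyIntOr0 player "start"
            let p_end := pyIntOr0 player "end"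
            let overlap := min p_end e - max p_start s
            if 0 ≤ overlap then
              acc ++ [(|p_start - s| + |p_end - e|, -overlap, player)]
            else acc) []) (fun it => it.1) (fun it => it.2.1) with
        | o :: _ => some o.2.2
        | [] =>
          match PySem.List.sorted (c.foldl (fun acc player =>
              let p_start := pyIntOr0 player "start"
              let p_end := pyIntOr0 player "end"
              let distance := |p_start - s| + |p_end - e|
              acc ++ [(distance, player)]) []) (fun it => it.1) with
          | n :: _ => some n.2
          | [] => none) := rfl
  rw [hA]
  cases h0 : c.filter (fun p => (pyIntOr0 p "start" == s) && (pyIntOr0 p "end" == e)) with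
  | cons ex r => exact (pvT0 s e c ex r h0).symm
  | nil =>
    have hall : ∀ p ∈ c, pvB0 s e p = false := by
      intro p hp
      have hnil := List.filter_eq_nil_iff.mp (show c.filter (pvB0 s e) = [] from h0)
      exact Bool.eq_false_iff.mpr (hnil p hp)
    have hovl : c.foldl (fun acc player =>
        let p_start := pyIntOr0 player "start"
        let p_end := pyIntOr0 player "end"
        let overlap := min p_end e - max p_start s
        if 0 ≤ overlap then
          acc ++ [(|p_start - s| + |p_end - e|, -overlap, player)]
        else acc) [] =
        (c.filter (fun p => decide (0 ≤ pvOv s e p))).map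
          (fun p => (pvDist s e p, -pvOv s e p, p)) := by
      have hb := PySem.List.foldl_append_ite (fun player => 0 ≤ pvOv s e player)
        (fun p => (pvDist s e p, -pvOv s e p, p)) c []
      rw [List.nil_append] at hb
      exact hb
    have hne : c.foldl (fun acc player =>
        let p_start := pyIntOr0 player "start"
        let p_end := pyIntOr0 player "end"
        let distance := |p_start - s| + |p_end - e|
        acc ++ [(distance, player)]) [] =
        c.map (fun p => (pvDist s e p, p)) := by
      have hb := PySem.List.foldl_append_singleton_eq_map
        (fun p => (pvDist s e p, p)) c []
      rw [List.nil_append] at hb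
      exact hb
    rw [hovl, hne, pvT1 s e c hall]
    cases hs2 : PySem.List.sorted2
        ((c.filter (fun p => decide (0 ≤ pvOv s e p))).map
          (fun p => (pvDist s e p, -pvOv s e p, p)))
        (fun it => it.1) (fun it => it.2.1) with
    | cons o tl =>
      have hh := pvHead_sorted2 ((c.filter (fun p => decide (0 ≤ pvOv s e p))).map
          (fun p => (pvDist s e p, -pvOv s e p, p)))
      rw [hs2, pvFMin_map] at hh
      have hh2 : some o = (pvFMin (pvLt2 s e) (c.filter (fun p => decide (0 ≤ pvOv s e p)))).map
          (fun p => (pvDist s e p, -pvOv s e p, p)) := hh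
      cases hf : pvFMin (pvLt2 s e) (c.filter (fun p => decide (0 ≤ pvOv s e p))) with
      | none => rw [hf] at hh2; simp at hh2
      | some p =>
        rw [hf] at hh2
        simp only [Option.map_some, Option.some.injEq] at hh2
        subst hh2
        rfl
    | nil =>
      have hh := pvHead_sorted2 ((c.filter (fun p => decide (0 ≤ pvOv s e p))).map
          (fun p => (pvDist s e p, -pvOv s e p, p)))
      rw [hs2, pvFMin_map] at hh
      have hh2 : (none : Option (Int × Int × List (String × Int))) =
          (pvFMin (pvLt2 s e) (c.filter (fun p => decide (0 ≤ pvOv s e p)))).map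
          (fun p => (pvDist s e p, -pvOv s e p, p)) := hh
      have hf : pvFMin (pvLt2 s e) (c.filter (fun p => decide (0 ≤ pvOv s e p))) = none := by
        cases hf2 : pvFMin (pvLt2 s e) (c.filter (fun p => decide (0 ≤ pvOv s e p))) with
        | none => rfl
        | some p => rw [hf2] at hh2; simp at hh2
      cases hs1 : PySem.List.sorted (c.map (fun p => (pvDist s e p, p))) (fun it => it.1) with
      | cons n tl =>
        have hh1 := pvHead_sorted1 (c.map (fun p => (pvDist s e p, p)))
        rw [hs1, pvFMin_map] at hh1
        have hh1' : some n = (pvFMin (pvLtd s e) c).map (fun p => (pvDist s e p, p)) := hh1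
        cases hf1 : pvFMin (pvLtd s e) c with
        | none => rw [hf1] at hh1'; simp at hh1'
        | some q =>
          rw [hf1] at hh1'
          simp only [Option.map_some, Option.some.injEq] at hh1'
          subst hh1'
          rw [hf]
      | nil =>
        have hh1 := pvHead_sorted1 (c.map (fun p => (pvDist s e p, p)))
        rw [hs1, pvFMin_map] at hh1
        have hh1' : (none : Option (Int × List (String × Int))) =
            (pvFMin (pvLtd s e) c).map (fun p => (pvDist s e p, p)) := hh1
        have hf1 : pvFMin (pvLtd s e) c = none := by
          cases hf2 : pvFMin (pvLtd s e) c with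
          | none => rfl
          | some q => rw [hf2] at hh1'; simp at hh1'
        rw [hf, hf1]
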